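-- pv_equiv track=rewrite | github.com/karamkharrathelou/1-Detection-Algorithm | reconstruction.py | find_fminmax
-- ===== SOURCE A (Python) =====
-- def find_fminmax(values, threshold, consecutive_count):
--     # Check if each value exceeds the threshold
--     binary_values = [1 if val > threshold else 0 for val in values]
--     # Find the indices of the first occurrence of consecutive_count consecutive ones
--     first_occurrence_index = find_consecutive_ones(binary_values, consecutive_count)
--     # Reverse the list and find the indices of the last occurrence of consecutive_count consecutive ones
--     reversed_binary_values = binary_values[::-1]
--     last_occurrence_index_reverse = find_consecutive_ones(reversed_binary_values, consecutive_count)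
--     # If there are no consecutive_count consecutive ones, return -1
--     if first_occurrence_index == -1 or last_occurrence_index_reverse == -1:
--         return -1, -1
--     # Calculate the actual indices in the original list
--     last_occurrence_index = len(values) - 1 - last_occurrence_index_reverse
--     return first_occurrence_index, last_occurrence_index
--
-- def find_consecutive_ones(binary_values, consecutive_count):
--     for i in range(len(binary_values) - consecutive_count + 1):
--         if all(binary_values[i + j] == 1 for j in range(consecutive_count)):
--             return i
--     return -1
-- ===== SOURCE B (Python) =====
-- def find_fminmax(values, threshold, consecutive_count):
--     # Single pass tracking the current run of consecutive over-threshold values.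
--     # first = start index of the first run of length consecutive_count,
--     # last  = end index of the last such run (matching A's first-start/last-end convention).
--     if consecutive_count <= 0:
--         # every position trivially starts a run of length <= 0
--         return 0, len(values) - 1
--     run = 0
--     first = -1
--     last = -1
--     for i, v in enumerate(values):
--         run = run + 1 if v > threshold else 0
--         if run >= consecutive_count:
--             if first == -1:
--                 first = i - consecutive_count + 1
--             last = i
--     return first, last
-- ===== Notes on version B (the rewrite author's own statement) =====
-- stated objective: faster
-- what changed: Replaces the two windowed scans (forward and over the reversed list, each re-checking k elements per position) by one pass that tracks the current run length of consecutive over-threshold values, recording the first run's start and the last run's end.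
import Mathlib
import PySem

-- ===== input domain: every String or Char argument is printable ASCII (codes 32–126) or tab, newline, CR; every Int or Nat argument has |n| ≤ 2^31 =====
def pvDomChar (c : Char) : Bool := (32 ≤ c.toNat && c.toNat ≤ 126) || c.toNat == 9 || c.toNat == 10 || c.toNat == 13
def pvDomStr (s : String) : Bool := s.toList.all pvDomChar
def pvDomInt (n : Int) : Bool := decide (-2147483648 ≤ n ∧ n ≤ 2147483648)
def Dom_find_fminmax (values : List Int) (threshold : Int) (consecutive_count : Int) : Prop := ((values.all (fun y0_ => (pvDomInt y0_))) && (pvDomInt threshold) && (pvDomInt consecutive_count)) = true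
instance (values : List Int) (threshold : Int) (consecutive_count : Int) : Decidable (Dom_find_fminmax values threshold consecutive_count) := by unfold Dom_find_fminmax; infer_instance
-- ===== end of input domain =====

-- B replaces A's two O(n*k) windowed scans by one O(n) pass tracking the current run length.

-- ===== PORT A =====
-- loop of find_consecutive_ones: for i in range(...): if all(bv[i+j] == 1 for j in range(k)): return i / return -1
def fco_loop (bv : List Int) (k : Int) : List Int → Int
  | [] => -1
  | i :: rest =>
    if (PySem.List.pyRange 0 k 1).all (fun j => PySem.List.pyGet? bv (i + j) == some 1) then i
    else fco_loop bv k rest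

def find_consecutive_ones (bv : List Int) (k : Int) : Int :=
  fco_loop bv k (PySem.List.pyRange 0 ((bv.length : Int) - k + 1) 1)

def find_fminmax (values : List Int) (threshold : Int) (consecutive_count : Int) : Int × Int :=
  let binary_values := values.map (fun val => if val > threshold then (1 : Int) else 0)
  let first_occurrence_index := find_consecutive_ones binary_values consecutive_count
  -- binary_values[::-1] = reverse (PySem.List.slice?_none_none_neg_one)
  let reversed_binary_values := binary_values.reverse
  let last_occurrence_index_reverse := find_consecutive_ones reversed_binary_values consecutive_count
  if first_occurrence_index == -1 || last_occurrence_index_reverse == -1 then (-1, -1)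
  else (first_occurrence_index, (values.length : Int) - 1 - last_occurrence_index_reverse)

-- ===== PORT B =====
def find_fminmax_alt (values : List Int) (threshold : Int) (consecutive_count : Int) : Int × Int :=
  if consecutive_count ≤ 0 then (0, (values.length : Int) - 1)
  else
    let s :=
      (PySem.List.enumerate values 0).foldl
        (fun (st : Int × Int × Int) iv =>
          let run := if iv.2 > threshold then st.1 + 1 else 0
          if run ≥ consecutive_count then
            (run, (if st.2.1 == -1 then iv.1 - consecutive_count + 1 else st.2.1), iv.1)
          else (run, st.2.1, st.2.2))
        (0, -1, -1)
    (s.2.1, s.2.2)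

-- ===== PRECONDITION & SPEC =====
def Spec_find_fminmax (values : List Int) (threshold : Int) (consecutive_count : Int) (out : Int × Int) : Prop := out = find_fminmax_alt values threshold consecutive_count
instance (values : List Int) (threshold : Int) (consecutive_count : Int) (out : Int × Int) : Decidable (Spec_find_fminmax values threshold consecutive_count out) := by unfold Spec_find_fminmax; infer_instance

-- ===== CLAIM (what is proved, stated in full; the proofs are below) =====
def Claim_equal_find_fminmax : Prop := ∀ (values : List Int) (threshold : Int) (consecutive_count : Int), Dom_find_fminmax values threshold consecutive_count → Spec_find_fminmax values threshold consecutive_count (find_fminmax values threshold consecutive_count)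

-- ===== LEMMAS AND PROOFS =====

-- "a run of kn consecutive over-threshold values ends at index e of l"
def okP (t : Int) (kn : Nat) (l : List Int) (e : Nat) : Bool :=
  decide (kn ≤ e + 1) && (List.range kn).all (fun j => decide (t < l.getD (e - j) 0))

def firstE (t : Int) (kn : Nat) (l : List Int) : Option Nat :=
  (List.range l.length).find? (okP t kn l)

def lastE (t : Int) (kn : Nat) (l : List Int) : Option Nat :=
  (List.range l.length).reverse.find? (okP t kn l)

def runLen (t : Int) (l : List Int) : Nat :=
  l.foldl (fun r v => if t < v then r + 1 else 0) 0


lemma find?_range_eq_none (p : Nat → Bool) (n : Nat) :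
    (List.range n).find? p = none ↔ ∀ j < n, p j = false := by
  simp [List.find?_eq_none, List.mem_range]

lemma find?_range_reverse_eq_none (p : Nat → Bool) (n : Nat) :
    (List.range n).reverse.find? p = none ↔ ∀ j < n, p j = false := by
  simp [List.find?_eq_none, List.mem_range]

lemma find?_range_eq_some (p : Nat → Bool) (n m : Nat) :
    (List.range n).find? p = some m ↔ m < n ∧ p m = true ∧ ∀ j < m, p j = false := by
  induction n generalizing m with
  | zero => simp
  | succ n ih =>
    rw [List.range_succ, List.find?_append]
    cases h : (List.range n).find? p with
    | some a =>
      rw [ih] at h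
      simp only [Option.some_or, Option.some.injEq]
      constructor
      · rintro rfl; exact ⟨by omega, h.2.1, h.2.2⟩
      · rintro ⟨hm, hpm, hmin⟩
        by_contra hne
        rcases Nat.lt_or_ge m a with hlt | hlt
        · rw [h.2.2 m hlt] at hpm; exact absurd hpm (by simp)
        · have : a < m := by omega
          have := hmin a this
          rw [h.2.1] at this; exact absurd this (by simp)
    | none =>
      rw [find?_range_eq_none] at h
      simp only [Option.none_or, List.find?_singleton]
      cases hp : p n with
      | true =>
        simp only [reduceIte, Option.some.injEq]
        constructor
        · rintro rfl; exact ⟨by omega, hp, h⟩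
        · rintro ⟨hm, hpm, -⟩
          by_contra hne
          have : m < n := by omega
          rw [h m this] at hpm; exact absurd hpm (by simp)
      | false =>
        constructor
        · simp
        · rintro ⟨hm, hpm, -⟩
          rcases Nat.lt_or_ge m n with hlt | hlt
          · rw [h m hlt] at hpm; exact absurd hpm (by simp)
          · have : m = n := by omega
            rw [this, hp] at hpm; exact absurd hpm (by simp)

lemma find?_range_reverse_eq_some (p : Nat → Bool) (n m : Nat) :
    (List.range n).reverse.find? p = some m ↔ m < n ∧ p m = true ∧ ∀ j, m < j → j < n → p j = false := by
  induction n generalizing m with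
  | zero => simp
  | succ n ih =>
    have hrev : (List.range (n+1)).reverse = n :: (List.range n).reverse := by
      rw [List.range_succ]; simp
    rw [hrev, List.find?_cons]
    cases hp : p n with
    | true =>
      simp only [reduceIte, Option.some.injEq]
      constructor
      · rintro rfl
        exact ⟨by omega, hp, fun j h1 h2 => by omega⟩
      · rintro ⟨hm, hpm, hmax⟩
        by_contra hne
        have := hmax n (by omega) (by omega)
        rw [hp] at this; exact absurd this (by simp)
    | false =>
      simp only [cond_false, ih]
      constructor
      · rintro ⟨h1, h2, h3⟩
        refine ⟨by omega, h2, fun j hj1 hj2 => ?_⟩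
        rcases Nat.lt_or_ge j n with h | h
        · exact h3 j hj1 h
        · have : j = n := by omega
          rw [this]; exact hp
      · rintro ⟨h1, h2, h3⟩
        have hmn : m ≠ n := fun he => by rw [he, hp] at h2; exact absurd h2 (by simp)
        exact ⟨by omega, h2, fun j hj1 hj2 => h3 j hj1 (by omega)⟩


lemma find?_congr' {α} (p q : α → Bool) (l : List α) (h : ∀ a ∈ l, p a = q a) :
    l.find? p = l.find? q := by
  induction l with
  | nil => rfl
  | cons x xs ih =>
    simp only [List.find?_cons]
    rw [h x (by simp)]
    cases q x
    · exact ih fun a ha => h a (by simp [ha])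
    · rfl

lemma runLen_append (t : Int) (l : List Int) (x : Int) :
    runLen t (l ++ [x]) = if t < x then runLen t l + 1 else 0 := by
  simp [runLen, List.foldl_append]

lemma runLen_ge_iff (t : Int) (l : List Int) (m : Nat) :
    m ≤ runLen t l ↔ m ≤ l.length ∧ ∀ j < m, t < l.getD (l.length - 1 - j) 0 := by
  induction l using List.reverseRecOn generalizing m with
  | nil =>
    simp only [runLen, List.foldl_nil, List.length_nil]
    constructor
    · intro h; exact ⟨h, fun j hj => by omega⟩
    · intro ⟨h, _⟩; exact h
  | append_singleton l x ih =>
    rw [runLen_append]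
    simp only [List.length_append, List.length_singleton]
    by_cases hx : t < x
    · rw [if_pos hx]
      cases m with
      | zero => simp
      | succ m' =>
        have key : ∀ j < m' + 1, (0 < j → ((l ++ [x]).getD (l.length + 1 - 1 - j) 0 = l.getD (l.length - 1 - (j-1)) 0 ∨ l.length = 0)) ∧ (j = 0 → (l ++ [x]).getD (l.length + 1 - 1 - j) 0 = x) := by
          intro j hj
          constructor
          · intro hj0
            by_cases hl : l.length = 0
            · right; exact hl
            · left
              rw [List.getD_append _ _ _ _ (by omega)]
              congr 1
              omega
          · intro hj0
            subst hj0
            simp [List.getD_append_right]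
        constructor
        · intro h
          have h1 : m' ≤ runLen t l := by omega
          rw [ih] at h1
          refine ⟨by omega, fun j hj => ?_⟩
          rcases Nat.eq_zero_or_pos j with rfl | hj0
          · rw [((key 0 hj).2 rfl)]; exact hx
          · rcases ((key j hj).1 hj0) with heq | hlen
            · rw [heq]; exact h1.2 (j-1) (by omega)
            · -- l empty: then m' ≤ 0 so j < 1, contradiction with hj0
              have := h1.1; omega
        · intro ⟨hlen, hall⟩
          have h1 : m' ≤ runLen t l := by
            rw [ih]
            refine ⟨by omega, fun j hj => ?_⟩
            have := hall (j+1) (by omega)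
            rcases ((key (j+1) (by omega)).1 (by omega)) with heq | hl0
            · rw [heq] at this; simpa using this
            · omega
          omega
    · rw [if_neg hx]
      constructor
      · intro h
        have : m = 0 := by omega
        subst this
        exact ⟨by omega, fun j hj => by omega⟩
      · intro ⟨hlen, hall⟩
        by_contra h
        have hm : 0 < m := by omega
        have := hall 0 hm
        rw [List.getD_append_right _ _ _ _ (by omega)] at this
        simp at this
        omega

lemma okP_append (t : Int) (kn : Nat) (l : List Int) (x : Int) (e : Nat) (he : e < l.length) :
    okP t kn (l ++ [x]) e = okP t kn l e := by
  rw [Bool.eq_iff_iff]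
  simp only [okP, Bool.and_eq_true, decide_eq_true_eq, List.all_eq_true, List.mem_range]
  constructor
  · intro ⟨h1, h2⟩
    refine ⟨h1, fun j hj => ?_⟩
    have := h2 j hj
    rwa [List.getD_append _ _ _ _ (by omega)] at this
  · intro ⟨h1, h2⟩
    refine ⟨h1, fun j hj => ?_⟩
    rw [List.getD_append _ _ _ _ (by omega)]
    exact h2 j hj

lemma okP_last (t : Int) (kn : Nat) (l : List Int) (hl : l ≠ []) :
    okP t kn l (l.length - 1) = decide (kn ≤ runLen t l) := by
  have hlen : 0 < l.length := List.length_pos_of_ne_nil hl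
  rw [Bool.eq_iff_iff]
  simp only [okP, Bool.and_eq_true, decide_eq_true_eq, List.all_eq_true, List.mem_range]
  rw [runLen_ge_iff]
  constructor
  · intro ⟨h1, h2⟩
    exact ⟨by omega, fun j hj => by simpa using h2 j hj⟩
  · intro ⟨h1, h2⟩
    exact ⟨by omega, fun j hj => by simpa using h2 j hj⟩

-- B's fold invariant
lemma firstE_some_le (t : Int) (kn : Nat) (l : List Int) (e : Nat)
    (h : firstE t kn l = some e) : kn ≤ e + 1 := by
  unfold firstE at h
  rw [find?_range_eq_some] at h
  have := h.2.1
  simp only [okP, Bool.and_eq_true, decide_eq_true_eq] at this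
  exact this.1

lemma firstE_append (t : Int) (kn : Nat) (l : List Int) (x : Int) :
    firstE t kn (l ++ [x]) =
      (firstE t kn l).or (if okP t kn (l ++ [x]) l.length = true then some l.length else none) := by
  unfold firstE
  simp only [List.length_append, List.length_singleton]
  rw [List.range_succ, List.find?_append]
  rw [find?_congr' _ (okP t kn l) _ (fun a ha => okP_append t kn l x a (List.mem_range.mp ha))]
  rw [List.find?_singleton]

lemma lastE_append (t : Int) (kn : Nat) (l : List Int) (x : Int) :
    lastE t kn (l ++ [x]) =
      if okP t kn (l ++ [x]) l.length = true then some l.length else lastE t kn l := by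
  unfold lastE
  simp only [List.length_append, List.length_singleton]
  have hrev : (List.range (l.length + 1)).reverse = l.length :: (List.range l.length).reverse := by
    rw [List.range_succ]; simp
  rw [hrev, List.find?_cons]
  rw [find?_congr' _ (okP t kn l) _
    (fun a ha => okP_append t kn l x a (List.mem_range.mp (List.mem_reverse.mp ha)))]
  cases okP t kn (l ++ [x]) l.length <;> simp

lemma alt_fold_inv (t k : Int) (hk : 1 ≤ k) (l : List Int) :
    (PySem.List.enumerate l 0).foldl
        (fun (st : Int × Int × Int) iv =>
          let run := if iv.2 > t then st.1 + 1 else 0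
          if run ≥ k then
            (run, (if st.2.1 == -1 then iv.1 - k + 1 else st.2.1), iv.1)
          else (run, st.2.1, st.2.2))
        (0, -1, -1)
      = ((runLen t l : Int),
         (match firstE t k.toNat l with | some e => (e : Int) - k + 1 | none => -1),
         (match lastE t k.toNat l with | some e => (e : Int) | none => -1)) := by
  induction l using List.reverseRecOn with
  | nil => rfl
  | append_singleton l x ih =>
    rw [PySem.List.enumerate_append, List.foldl_append, ih]
    rw [PySem.List.enumerate_cons, PySem.List.enumerate_nil]
    rw [List.foldl_cons, List.foldl_nil]
    simp only []
    have hrun : (if x > t then ((runLen t l : Int)) + 1 else 0) = ((runLen t (l ++ [x]) : Nat) : Int) := by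
      rw [runLen_append]
      split <;> push_cast <;> ring
    rw [hrun]
    have hne : l ++ [x] ≠ [] := by simp
    have hlast : okP t k.toNat (l ++ [x]) l.length = decide (k.toNat ≤ runLen t (l ++ [x])) := by
      have := okP_last t k.toNat (l ++ [x]) hne
      simpa using this
    rw [firstE_append, lastE_append, hlast]
    by_cases hok : k.toNat ≤ runLen t (l ++ [x])
    · rw [if_pos (show ((runLen t (l ++ [x]) : Nat) : Int) ≥ k by omega)]
      have hdec : (decide (k.toNat ≤ runLen t (l ++ [x]))) = true := by simp [hok]
      rw [if_pos hdec, if_pos hdec]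
      cases hF : firstE t k.toNat l with
      | none =>
        simp only [Option.none_or]
        norm_num
      | some e =>
        simp only [Option.some_or]
        have he : k.toNat ≤ e + 1 := firstE_some_le t k.toNat l e hF
        have hbeq : (((e : Int) - k + 1) == -1) = false := by
          rw [beq_eq_false_iff_ne]
          omega
        rw [hbeq]
        norm_num
    · rw [if_neg (show ¬ ((runLen t (l ++ [x]) : Nat) : Int) ≥ k by omega)]
      rw [if_neg (by simp; omega), if_neg (by simp; omega)]
      simp

-- A-side characterization
lemma fco_loop_eq (bv : List Int) (k : Int) (l : List Int) :
    fco_loop bv k l =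
      ((l.find? (fun i => (PySem.List.pyRange 0 k 1).all
          (fun j => PySem.List.pyGet? bv (i + j) == some 1))).getD (-1)) := by
  induction l with
  | nil => rfl
  | cons i rest ih =>
    rw [fco_loop, List.find?_cons]
    cases hc : (PySem.List.pyRange 0 k 1).all (fun j => PySem.List.pyGet? bv (i + j) == some 1) <;>
      simp [hc, ih]

lemma fco_nonpos (bv : List Int) (k : Int) (hk : k ≤ 0) :
    find_consecutive_ones bv k = 0 := by
  unfold find_consecutive_ones
  rw [PySem.List.pyRange_one_cons (by omega : (0:Int) < (bv.length : Int) - k + 1)]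
  rw [fco_loop]
  rw [PySem.List.pyRange_one_eq_nil hk]
  simp

lemma bv_get (t : Int) (values : List Int) (m : Nat) (hm : m < values.length) :
    (((values.map (fun val => if val > t then (1:Int) else 0))[m]? == some 1) = true)
      ↔ t < values.getD m 0 := by
  rw [List.getElem?_map, List.getElem?_eq_getElem hm, List.getD_eq_getElem _ _ hm]
  by_cases h : values[m] > t <;> simp [h]

lemma window_iff (t k : Int) (hk : 1 ≤ k) (values : List Int) (i : Nat)
    (hi : i + k.toNat ≤ values.length) :
    ((PySem.List.pyRange 0 k 1).all
        (fun j => PySem.List.pyGet? (values.map (fun val => if val > t then (1:Int) else 0)) ((i : Int) + j) == some 1))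
      = okP t k.toNat values (i + k.toNat - 1) := by
  rw [Bool.eq_iff_iff]
  simp only [List.all_eq_true, okP, Bool.and_eq_true, decide_eq_true_eq, List.mem_range,
    PySem.List.mem_pyRange_one]
  constructor
  · intro h
    refine ⟨by omega, fun j hj => ?_⟩
    have hjk : ((k.toNat - 1 - j : Nat) : Int) < k := by omega
    have h2 := h ((k.toNat - 1 - j : Nat) : Int) ⟨by omega, hjk⟩
    rw [PySem.List.pyGet?_of_nonneg (i := (i : Int) + ((k.toNat - 1 - j : Nat) : Int)) _ (by omega)] at h2
    have hidx : ((i : Int) + ((k.toNat - 1 - j : Nat) : Int)).toNat = i + k.toNat - 1 - j := by omega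
    rw [hidx] at h2
    have := (bv_get t values (i + k.toNat - 1 - j) (by omega)).mp h2
    exact this
  · rintro ⟨-, h⟩ j hj
    rw [PySem.List.pyGet?_of_nonneg (i := (i : Int) + j) _ (by omega)]
    have hidx : (((i : Int) + j).toNat) = i + k.toNat - 1 - (k.toNat - 1 - j.toNat) := by omega
    rw [hidx]
    exact (bv_get t values _ (by omega)).mpr (h (k.toNat - 1 - j.toNat) (by omega))

lemma window_rev_iff (t k : Int) (hk : 1 ≤ k) (values : List Int) (i : Nat)
    (hi : i + k.toNat ≤ values.length) :
    ((PySem.List.pyRange 0 k 1).all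
        (fun j => PySem.List.pyGet? (values.map (fun val => if val > t then (1:Int) else 0)).reverse ((i : Int) + j) == some 1))
      = okP t k.toNat values (values.length - 1 - i) := by
  rw [Bool.eq_iff_iff]
  simp only [List.all_eq_true, okP, Bool.and_eq_true, decide_eq_true_eq, List.mem_range,
    PySem.List.mem_pyRange_one]
  have hlen : (values.map (fun val => if val > t then (1:Int) else 0)).reverse.length = values.length := by simp
  constructor
  · intro h
    refine ⟨by omega, fun j hj => ?_⟩
    have h2 := h ((j : Nat) : Int) ⟨by omega, by omega⟩
    rw [PySem.List.pyGet?_of_nonneg (i := (i : Int) + ((j : Nat) : Int)) _ (by omega)] at h2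
    have hidx : (((i : Int) + ((j : Nat) : Int)).toNat) = i + j := by omega
    rw [hidx] at h2
    rw [List.getElem?_reverse (by simp; omega)] at h2
    have hlen2 : (values.map (fun val => if val > t then (1:Int) else 0)).length = values.length := by simp
    rw [hlen2] at h2
    have := (bv_get t values (values.length - 1 - (i + j)) (by omega)).mp h2
    have hidx2 : values.length - 1 - (i + j) = values.length - 1 - i - j := by omega
    rwa [hidx2] at this
  · rintro ⟨-, h⟩ j hj
    rw [PySem.List.pyGet?_of_nonneg (i := (i : Int) + j) _ (by omega)]
    have hidx : (((i : Int) + j).toNat) = i + j.toNat := by omega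
    rw [hidx]
    rw [List.getElem?_reverse (by simp; omega)]
    have hlen2 : (values.map (fun val => if val > t then (1:Int) else 0)).length = values.length := by simp
    rw [hlen2]
    refine (bv_get t values (values.length - 1 - (i + j.toNat)) (by omega)).mpr ?_
    have := h j.toNat (by omega)
    have hidx2 : values.length - 1 - i - j.toNat = values.length - 1 - (i + j.toNat) := by omega
    rwa [hidx2] at this

lemma A_first (t k : Int) (hk : 1 ≤ k) (values : List Int) :
    find_consecutive_ones (values.map (fun val => if val > t then (1:Int) else 0)) k
      = (match firstE t k.toNat values with
         | some e => (e : Int) - k + 1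
         | none => -1) := by
  unfold find_consecutive_ones
  rw [fco_loop_eq]
  have hlen : (values.map (fun val => if val > t then (1:Int) else 0)).length = values.length := by simp
  rw [hlen, PySem.List.pyRange_one 0 ((values.length : Int) - k + 1), List.find?_map]
  cases h : firstE t k.toNat values with
  | some e =>
    unfold firstE at h
    rw [find?_range_eq_some] at h
    obtain ⟨hen, hoke, hmin⟩ := h
    have hke : k.toNat ≤ e + 1 := by
      simp only [okP, Bool.and_eq_true, decide_eq_true_eq] at hoke
      exact hoke.1
    have hfind : (List.range (((values.length : Int) - k + 1) - 0).toNat).find?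
        ((fun i => (PySem.List.pyRange 0 k 1).all
          (fun j => PySem.List.pyGet? (values.map (fun val => if val > t then (1:Int) else 0)) (i + j) == some 1)) ∘ (fun m : Nat => (0 : Int) + (m : Int)))
        = some (e + 1 - k.toNat) := by
      rw [find?_range_eq_some]
      refine ⟨by omega, ?_, ?_⟩
      · show ((PySem.List.pyRange 0 k 1).all _) = true
        have hw := window_iff t k hk values (e + 1 - k.toNat) (by omega)
        have hidx : e + 1 - k.toNat + k.toNat - 1 = e := by omega
        rw [hidx] at hw
        simp only [zero_add] at hw ⊢
        rw [hw]
        exact hoke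
      · intro i hi
        show ((PySem.List.pyRange 0 k 1).all _) = false
        have hw := window_iff t k hk values i (by omega)
        simp only [zero_add] at hw ⊢
        rw [hw]
        exact hmin (i + k.toNat - 1) (by omega)
    rw [hfind]
    simp only [Option.map_some, Option.getD_some]
    show (0 : Int) + ((e + 1 - k.toNat : Nat) : Int) = (e : Int) - k + 1
    omega
  | none =>
    unfold firstE at h
    rw [find?_range_eq_none] at h
    have hfind : (List.range (((values.length : Int) - k + 1) - 0).toNat).find?
        ((fun i => (PySem.List.pyRange 0 k 1).all
          (fun j => PySem.List.pyGet? (values.map (fun val => if val > t then (1:Int) else 0)) (i + j) == some 1)) ∘ (fun m : Nat => (0 : Int) + (m : Int)))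
        = none := by
      rw [find?_range_eq_none]
      intro i hi
      show ((PySem.List.pyRange 0 k 1).all _) = false
      have hw := window_iff t k hk values i (by omega)
      simp only [zero_add] at hw ⊢
      rw [hw]
      exact h (i + k.toNat - 1) (by omega)
    rw [hfind]
    rfl

lemma A_last (t k : Int) (hk : 1 ≤ k) (values : List Int) :
    find_consecutive_ones (values.map (fun val => if val > t then (1:Int) else 0)).reverse k
      = (match lastE t k.toNat values with
         | some e => (values.length : Int) - 1 - (e : Int)
         | none => -1) := by
  unfold find_consecutive_ones
  rw [fco_loop_eq]
  have hlen : (values.map (fun val => if val > t then (1:Int) else 0)).reverse.length = values.length := by simp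
  rw [hlen, PySem.List.pyRange_one 0 ((values.length : Int) - k + 1), List.find?_map]
  cases h : lastE t k.toNat values with
  | some e =>
    unfold lastE at h
    rw [find?_range_reverse_eq_some] at h
    obtain ⟨hen, hoke, hmax⟩ := h
    have hke : k.toNat ≤ e + 1 := by
      simp only [okP, Bool.and_eq_true, decide_eq_true_eq] at hoke
      exact hoke.1
    have hfind : (List.range (((values.length : Int) - k + 1) - 0).toNat).find?
        ((fun i => (PySem.List.pyRange 0 k 1).all
          (fun j => PySem.List.pyGet? (values.map (fun val => if val > t then (1:Int) else 0)).reverse (i + j) == some 1)) ∘ (fun m : Nat => (0 : Int) + (m : Int)))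
        = some (values.length - 1 - e) := by
      rw [find?_range_eq_some]
      refine ⟨by omega, ?_, ?_⟩
      · show ((PySem.List.pyRange 0 k 1).all _) = true
        have hw := window_rev_iff t k hk values (values.length - 1 - e) (by omega)
        have hidx : values.length - 1 - (values.length - 1 - e) = e := by omega
        rw [hidx] at hw
        simp only [zero_add] at hw ⊢
        rw [hw]
        exact hoke
      · intro i hi
        show ((PySem.List.pyRange 0 k 1).all _) = false
        have hw := window_rev_iff t k hk values i (by omega)
        simp only [zero_add] at hw ⊢
        rw [hw]
        exact hmax (values.length - 1 - i) (by omega) (by omega)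
    rw [hfind]
    simp only [Option.map_some, Option.getD_some]
    show (0 : Int) + ((values.length - 1 - e : Nat) : Int) = (values.length : Int) - 1 - (e : Int)
    omega
  | none =>
    unfold lastE at h
    rw [find?_range_reverse_eq_none] at h
    have hfind : (List.range (((values.length : Int) - k + 1) - 0).toNat).find?
        ((fun i => (PySem.List.pyRange 0 k 1).all
          (fun j => PySem.List.pyGet? (values.map (fun val => if val > t then (1:Int) else 0)).reverse (i + j) == some 1)) ∘ (fun m : Nat => (0 : Int) + (m : Int)))
        = none := by
      rw [find?_range_eq_none]
      intro i hi
      show ((PySem.List.pyRange 0 k 1).all _) = false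
      have hw := window_rev_iff t k hk values i (by omega)
      simp only [zero_add] at hw ⊢
      rw [hw]
      exact h (values.length - 1 - i) (by omega)
    rw [hfind]
    rfl

lemma lastE_some_lt (t : Int) (kn : Nat) (l : List Int) (e : Nat)
    (h : lastE t kn l = some e) : e < l.length := by
  unfold lastE at h
  rw [find?_range_reverse_eq_some] at h
  exact h.1

lemma firstE_none_iff_lastE_none (t : Int) (kn : Nat) (l : List Int) :
    firstE t kn l = none ↔ lastE t kn l = none := by
  unfold firstE lastE
  rw [find?_range_eq_none, find?_range_reverse_eq_none]

theorem find_fminmax_spec : Claim_equal_find_fminmax := by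
  intro values t k _
  show find_fminmax values t k = find_fminmax_alt values t k
  by_cases hk : k ≤ 0
  · unfold find_fminmax find_fminmax_alt
    rw [if_pos hk]
    simp only [fco_nonpos _ _ hk]
    norm_num
  · have hk1 : 1 ≤ k := by omega
    unfold find_fminmax find_fminmax_alt
    rw [if_neg hk]
    simp only [A_first t k hk1 values, A_last t k hk1 values, alt_fold_inv t k hk1 values]
    cases hF : firstE t k.toNat values with
    | none =>
      have hL : lastE t k.toNat values = none := (firstE_none_iff_lastE_none _ _ _).mp hF
      simp [hL]
    | some e1 =>
      cases hL : lastE t k.toNat values with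
      | none =>
        exact absurd ((firstE_none_iff_lastE_none _ _ _).mpr hL) (by simp [hF])
      | some e2 =>
        have he1 : k.toNat ≤ e1 + 1 := firstE_some_le t k.toNat values e1 hF
        have he2 : e2 < values.length := lastE_some_lt t k.toNat values e2 hL
        simp only []
        have hb1 : (((e1 : Int) - k + 1) == -1) = false := by
          rw [beq_eq_false_iff_ne]; omega
        have hb2 : (((values.length : Int) - 1 - (e2 : Int)) == -1) = false := by
          rw [beq_eq_false_iff_ne]; omega
        rw [hb1, hb2]
        simp only [Bool.or_self, if_false, Bool.false_eq_true]
        simp only [Prod.mk.injEq]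
        exact ⟨trivial, by ring⟩
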